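-- pv_equiv track=rewrite | github.com/mjsadeghinia/dynacomp | pv_analyzer.py | get_longest_consecutive_ids
-- ===== SOURCE A (Python) =====
-- def get_longest_consecutive_ids(arr):
--     # Parameters:
--     allowed_gap = 3  # Allowed gap after the first few strict numbers
--     strict_required_count = 5  # The first 'strict_required_count' numbers must be strictly consecutive with gap==1
--     longest_seq = []
--     current_seq = [arr[0]]
--     for i in range(1, len(arr)):
--         gap = arr[i] - arr[i - 1]
--         # Check if we're still in the "strict" part (first strict_required_count numbers)
--         if len(current_seq) < strict_required_count:
--             # During the strict part, the gap must be exactly 1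
--             if gap == 1:
--                 current_seq.append(arr[i])
--             else:
--                 # Before moving on, check if the current sequence is the longest
--                 if len(current_seq) > len(longest_seq):
--                     longest_seq = current_seq.copy()
--                 # Start a new sequence from the current number
--                 current_seq = [arr[i]]
--         else:
--             # After the strict portion, allow gaps up to allowed_gap
--             if gap <= allowed_gap:
--                 current_seq.append(arr[i])
--             else:
--                 # Check if the current sequence is the longest found so far
--                 if len(current_seq) > len(longest_seq):
--                     longest_seq = current_seq.copy()
--                 current_seq = [arr[i]]
--
--     # Final check for the last sequence
--     if len(current_seq) > len(longest_seq):
--         longest_seq = current_seq.copy()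
--     return longest_seq
-- ===== SOURCE B (Python) =====
-- def get_longest_consecutive_ids(arr):
--     # Two staged passes over indices: first record run-start boundaries as plain
--     # integers (no run lists are ever built), then pick the earliest widest
--     # boundary pair and return the corresponding slice of arr.
--     allowed_gap = 3
--     strict_required_count = 5
--     n = len(arr)
--     starts = [0]
--     for i in range(1, n):
--         run_len = i - starts[-1]
--         gap = arr[i] - arr[i - 1]
--         if not (gap == 1 if run_len < strict_required_count else gap <= allowed_gap):
--             starts.append(i)
--     ends = starts[1:] + [n]
--     s, e = max(zip(starts, ends), key=lambda p: p[1] - p[0])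
--     return arr[s:e]
-- ===== Notes on version B (the rewrite author's own statement) =====
-- stated objective: alternative
-- what changed: B never builds or copies run lists: a first pass records only integer run-start boundaries, then the earliest widest boundary pair is chosen with max over (start,end) pairs and the answer is produced as a single slice of arr; A maintains list copies and an inline running best.
-- outside the precondition, e.g. on get_longest_consecutive_ids([]): A raises IndexError, B returns []
import Mathlib
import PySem

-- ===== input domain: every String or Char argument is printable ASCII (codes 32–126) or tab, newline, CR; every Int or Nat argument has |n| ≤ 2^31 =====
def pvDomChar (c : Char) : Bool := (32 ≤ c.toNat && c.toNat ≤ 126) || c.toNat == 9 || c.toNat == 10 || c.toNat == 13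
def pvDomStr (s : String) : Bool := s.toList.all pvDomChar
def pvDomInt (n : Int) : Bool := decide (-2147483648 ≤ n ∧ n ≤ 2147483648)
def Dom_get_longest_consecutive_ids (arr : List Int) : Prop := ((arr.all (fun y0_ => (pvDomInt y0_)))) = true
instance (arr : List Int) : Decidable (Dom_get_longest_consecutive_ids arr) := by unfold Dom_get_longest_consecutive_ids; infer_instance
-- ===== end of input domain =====

-- B replaces A's run-list building and inline running best by two staged passes: record integer
-- run-start boundaries only, then pick the earliest widest boundary pair and slice arr once.

-- ===== PORT A =====
-- loop body of A: state (longest_seq, current_seq), index i, arr[i]/arr[i-1] via pyGetD (indices are always in range)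
def pvStepA (arr : List Int) (st : List Int × List Int) (i : Int) : List Int × List Int :=
  let gap := PySem.List.pyGetD arr i 0 - PySem.List.pyGetD arr (i - 1) 0
  if st.2.length < 5 then
    if gap = 1 then (st.1, st.2 ++ [PySem.List.pyGetD arr i 0])
    else (if st.2.length > st.1.length then st.2 else st.1, [PySem.List.pyGetD arr i 0])
  else
    if gap ≤ 3 then (st.1, st.2 ++ [PySem.List.pyGetD arr i 0])
    else (if st.2.length > st.1.length then st.2 else st.1, [PySem.List.pyGetD arr i 0])

def get_longest_consecutive_ids (arr : List Int) : List Int :=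
  match arr with
  | [] => []  -- Python raises IndexError on arr[0]; excluded by Pre_
  | a0 :: _ =>
    let st := (PySem.List.pyRange 1 (arr.length : Int) 1).foldl (pvStepA arr) ([], [a0])
    if st.2.length > st.1.length then st.2 else st.1

-- ===== PORT B =====
-- loop body of B's first pass: starts[-1] via pyGetD, appends the bare index i
def pvStepStarts (arr : List Int) (starts : List Int) (i : Int) : List Int :=
  let runLen := i - PySem.List.pyGetD starts (-1) 0
  let gap := PySem.List.pyGetD arr i 0 - PySem.List.pyGetD arr (i - 1) 0
  if (if runLen < 5 then gap = 1 else gap ≤ 3) then starts else starts ++ [i]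

def get_longest_consecutive_ids_alt (arr : List Int) : List Int :=
  let n : Int := (arr.length : Int)
  let starts := (PySem.List.pyRange 1 n 1).foldl (pvStepStarts arr) [(0 : Int)]
  let ends := PySem.List.slice starts (some 1) none ++ [n]
  -- Python max never sees an empty list here (starts is always nonempty); .getD only for totality
  let se := (PySem.List.max? (starts.zip ends) (fun p => p.2 - p.1)).getD (0, 0)
  PySem.List.slice arr (some se.1) (some se.2)

-- ===== PRECONDITION & SPEC =====
-- Pre_ excludes only the empty list, on which A raises IndexError (arr[0]); B happens to return [] there.
def Pre_get_longest_consecutive_ids (arr : List Int) : Prop := arr ≠ []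
instance (arr : List Int) : Decidable (Pre_get_longest_consecutive_ids arr) := by
  unfold Pre_get_longest_consecutive_ids; infer_instance
def pvWitness_get_longest_consecutive_ids : List Int := [1, 2, 3, 7]

def Spec_get_longest_consecutive_ids (arr : List Int) (out : List Int) : Prop := out = get_longest_consecutive_ids_alt arr
instance (arr : List Int) (out : List Int) : Decidable (Spec_get_longest_consecutive_ids arr out) := by unfold Spec_get_longest_consecutive_ids; infer_instance

-- ===== CLAIM (what is proved, stated in full; the proofs are below) =====
def Claim_equal_get_longest_consecutive_ids : Prop := ∀ (arr : List Int), Dom_get_longest_consecutive_ids arr → Pre_get_longest_consecutive_ids arr → Spec_get_longest_consecutive_ids arr (get_longest_consecutive_ids arr)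

-- ===== LEMMAS AND PROOFS =====

-- A's compare-and-replace, as a binary step
def pvBest (b s : List Int) : List Int := if s.length > b.length then s else b

-- A's loop body with the two array reads abstracted into (prev, cur)
def pvPairStepA (st : List Int × List Int) (prev cur : Int) : List Int × List Int :=
  if st.2.length < 5 then
    if cur - prev = 1 then (st.1, st.2 ++ [cur])
    else (pvBest st.1 st.2, [cur])
  else
    if cur - prev ≤ 3 then (st.1, st.2 ++ [cur])
    else (pvBest st.1 st.2, [cur])

theorem pvStepA_eq_pair (arr : List Int) (st : List Int × List Int) (i : Int) :
    pvStepA arr st i = pvPairStepA st (PySem.List.pyGetD arr (i - 1) 0) (PySem.List.pyGetD arr i 0) := rfl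

-- index loop over range(1, len(arr)) reading arr[i-1], arr[i]  =  fold over consecutive pairs
theorem pv_range_getD_zip (x : Int) (xs : List Int)
    (f : (List Int × List Int) → Int → Int → (List Int × List Int)) (init : List Int × List Int) :
    (List.range xs.length).foldl
        (fun st k => f st ((x :: xs).getD k 0) ((x :: xs).getD (k + 1) 0)) init
      = ((x :: xs).zip xs).foldl (fun st p => f st p.1 p.2) init := by
  induction xs generalizing x init with
  | nil => simp
  | cons y ys ih =>
    simp only [List.length_cons]
    rw [List.range_succ_eq_map]
    simp only [List.foldl_cons, List.foldl_map, List.zip_cons_cons]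
    simpa using ih y (f init x y)

theorem pv_fold_idx_zip (x : Int) (xs : List Int) (init : List Int × List Int) :
    (PySem.List.pyRange 1 ((x :: xs).length : Int) 1).foldl (pvStepA (x :: xs)) init
      = ((x :: xs).zip xs).foldl (fun st p => pvPairStepA st p.1 p.2) init := by
  rw [PySem.List.pyRange_one]
  have hlen : (((x :: xs).length : Int) - 1).toNat = xs.length := by simp
  rw [hlen]
  have hbody : ∀ (st : List Int × List Int) (k : Nat),
      pvStepA (x :: xs) st (1 + (k : Int))
        = pvPairStepA st ((x :: xs).getD k 0) ((x :: xs).getD (k + 1) 0) := by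
    intro st k
    rw [pvStepA_eq_pair]
    have h1 : (1 : Int) + (k : Int) - 1 = ((k : Nat) : Int) := by omega
    have h2 : (1 : Int) + (k : Int) = (((k + 1 : Nat)) : Int) := by push_cast; omega
    rw [h1, h2, PySem.List.pyGetD_natCast, PySem.List.pyGetD_natCast]
  rw [List.foldl_map]
  simp only [hbody]
  exact pv_range_getD_zip x xs pvPairStepA init

-- B's segments-as-lists shadow (proof device): same run splitting, runs kept most-recent-first
def pvStepB (segs : List (List Int)) (p : Int × Int) : List (List Int) :=
  match segs with
  | [] => [[p.2]]  -- unreachable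
  | run :: done =>
    let gap := p.2 - p.1
    let ok : Bool := if run.length < 5 then decide (gap = 1) else decide (gap ≤ 3)
    if ok then (run ++ [p.2]) :: done else [p.2] :: run :: done

-- Python max(·, key=len) over a nonempty list is the running compare-and-replace from its head
theorem pv_max?_cons (t : List (List Int)) :
    ∀ b : List Int,
      PySem.List.max? (b :: t) (fun s : List Int => s.length) = some (t.foldl pvBest b) := by
  induction t with
  | nil => intro b; rfl
  | cons s t ih =>
    intro b
    have h1 : PySem.List.max? (b :: s :: t) (fun s : List Int => s.length)
        = PySem.List.max? (pvBest b s :: t) (fun s : List Int => s.length) := by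
      simp only [PySem.List.max?, List.foldl_cons]
      by_cases h : b.length < s.length
      · simp [h, pvBest]
      · simp [h, pvBest]
    rw [h1, ih]
    simp [List.foldl_cons]

-- main loop invariant: A's (best-so-far, current) fold vs the collected segments
theorem pv_loop_inv (ps : List (Int × Int)) :
    ∀ (current : List Int) (fs : List (List Int)),
      current ≠ [] → (∀ s ∈ fs, s ≠ []) →
      (let st := ps.foldl (fun st p => pvPairStepA st p.1 p.2) (fs.foldl pvBest [], current)
       if st.2.length > st.1.length then st.2 else st.1)
        = (PySem.List.max? ((ps.foldl pvStepB (current :: fs.reverse)).reverse) (fun s => s.length)).getD [] := by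
  induction ps with
  | nil =>
    intro current fs hc hfs
    simp only [List.foldl_nil]
    have hrev : (current :: fs.reverse).reverse = fs ++ [current] := by simp
    rw [hrev]
    cases fs with
    | nil =>
      have hpos : 0 < current.length := List.length_pos_iff.mpr hc
      simp [pv_max?_cons, hpos]
    | cons h t =>
      have hh : h ≠ [] := hfs h (by simp)
      have hstep : pvBest [] h = h := by
        simp [pvBest, List.length_pos_iff.mpr hh]
      rw [show (h :: t) ++ [current] = h :: (t ++ [current]) from rfl,
          pv_max?_cons, List.foldl_append, Option.getD_some]
      simp only [List.foldl_cons, hstep]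
      simp [pvBest]
  | cons p ps ih =>
    intro current fs hc hfs
    simp only [List.foldl_cons]
    by_cases h5 : current.length < 5
    · by_cases hg : p.2 - p.1 = 1
      · have hA : pvPairStepA (fs.foldl pvBest [], current) p.1 p.2
            = (fs.foldl pvBest [], current ++ [p.2]) := by
          simp [pvPairStepA, h5, hg]
        have hB : pvStepB (current :: fs.reverse) p = (current ++ [p.2]) :: fs.reverse := by
          simp [pvStepB, h5, hg]
        rw [hA, hB]
        exact ih (current ++ [p.2]) fs (by simp) hfs
      · have hA : pvPairStepA (fs.foldl pvBest [], current) p.1 p.2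
            = (pvBest (fs.foldl pvBest []) current, [p.2]) := by
          simp [pvPairStepA, h5, hg]
        have hB : pvStepB (current :: fs.reverse) p = [p.2] :: (fs ++ [current]).reverse := by
          simp [pvStepB, h5, hg]
        rw [hA, hB, show pvBest (fs.foldl pvBest []) current = (fs ++ [current]).foldl pvBest [] by
          rw [List.foldl_append]; rfl]
        exact ih [p.2] (fs ++ [current]) (by simp)
          (by intro s hs; rcases List.mem_append.mp hs with h | h
              · exact hfs s h
              · simp at h; simpa [h])
    · by_cases hg : p.2 - p.1 ≤ 3
      · have hA : pvPairStepA (fs.foldl pvBest [], current) p.1 p.2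
            = (fs.foldl pvBest [], current ++ [p.2]) := by
          simp [pvPairStepA, h5, hg]
        have hB : pvStepB (current :: fs.reverse) p = (current ++ [p.2]) :: fs.reverse := by
          simp [pvStepB, h5, hg]
        rw [hA, hB]
        exact ih (current ++ [p.2]) fs (by simp) hfs
      · have hA : pvPairStepA (fs.foldl pvBest [], current) p.1 p.2
            = (pvBest (fs.foldl pvBest []) current, [p.2]) := by
          simp [pvPairStepA, h5, hg]
        have hB : pvStepB (current :: fs.reverse) p = [p.2] :: (fs ++ [current]).reverse := by
          simp [pvStepB, h5, hg]
        rw [hA, hB, show pvBest (fs.foldl pvBest []) current = (fs ++ [current]).foldl pvBest [] by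
          rw [List.foldl_append]; rfl]
        exact ih [p.2] (fs ++ [current]) (by simp)
          (by intro s hs; rcases List.mem_append.mp hs with h | h
              · exact hfs s h
              · simp at h; simpa [h])

-- B's boundary step with the two array reads abstracted out, plus the index carried in the state
def pvGcore (st : List Int) (i prev cur : Int) : List Int :=
  if (if i - PySem.List.pyGetD st (-1) 0 < 5 then cur - prev = 1 else cur - prev ≤ 3)
  then st else st ++ [i]

def pvG (q : List Int × Int) (p : Int × Int) : List Int × Int :=
  (pvGcore q.1 q.2 p.1 p.2, q.2 + 1)

-- indexed analogue of pv_range_getD_zip, the counter moved into the fold state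
theorem pv_range_getD_zip_idx (g : List Int → Int → Int → Int → List Int) :
    ∀ (xs : List Int) (x : Int) (init : List Int) (m : Int),
      (List.range xs.length).foldl
          (fun st (k : Nat) => g st (m + (k : Int) + 1) ((x :: xs).getD k 0) ((x :: xs).getD (k + 1) 0)) init
        = (((x :: xs).zip xs).foldl (fun q p => (g q.1 q.2 p.1 p.2, q.2 + 1)) (init, m + 1)).1 := by
  intro xs
  induction xs with
  | nil => intro x init m; simp
  | cons y ys ih =>
    intro x init m
    simp only [List.length_cons]
    rw [List.range_succ_eq_map]
    simp only [List.foldl_cons, List.foldl_map, List.zip_cons_cons]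
    have hbody : ∀ (st : List Int) (k : Nat),
        g st (m + ((k + 1 : Nat) : Int) + 1) ((x :: y :: ys).getD (k + 1) 0) ((x :: y :: ys).getD (k + 1 + 1) 0)
          = g st ((m + 1) + (k : Int) + 1) ((y :: ys).getD k 0) ((y :: ys).getD (k + 1) 0) := by
      intro st k
      have h1 : m + ((k + 1 : Nat) : Int) + 1 = (m + 1) + (k : Int) + 1 := by push_cast; omega
      rw [h1]; rfl
    simp only [Nat.succ_eq_add_one]
    rw [show ((x :: y :: ys).getD 0 0) = x from rfl,
        show ((x :: y :: ys).getD (0 + 1) 0) = y from rfl,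
        show m + ((0 : Nat) : Int) + 1 = m + 1 by norm_num]
    calc (List.range ys.length).foldl
            (fun st (k : Nat) => g st (m + ((k + 1 : Nat) : Int) + 1) ((x :: y :: ys).getD (k + 1) 0) ((x :: y :: ys).getD (k + 1 + 1) 0))
            (g init (m + 1) x y)
        = (List.range ys.length).foldl
            (fun st (k : Nat) => g st ((m + 1) + (k : Int) + 1) ((y :: ys).getD k 0) ((y :: ys).getD (k + 1) 0))
            (g init (m + 1) x y) := by simp only [hbody]
      _ = (((y :: ys).zip ys).foldl (fun q p => (g q.1 q.2 p.1 p.2, q.2 + 1)) (g init (m + 1) x y, (m + 1) + 1)).1 :=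
            ih y (g init (m + 1) x y) (m + 1)

-- B's first pass, as a fold of pvG over the consecutive pairs
theorem pv_fold_starts (x : Int) (xs : List Int) :
    (PySem.List.pyRange 1 (((x :: xs).length : Int)) 1).foldl (pvStepStarts (x :: xs)) [0]
      = (((x :: xs).zip xs).foldl pvG ([0], 1)).1 := by
  rw [PySem.List.pyRange_one]
  have hlen : (((x :: xs).length : Int) - 1).toNat = xs.length := by simp
  rw [hlen]
  have hbody : ∀ (st : List Int) (k : Nat),
      pvStepStarts (x :: xs) st (1 + (k : Int))
        = pvGcore st ((0 : Int) + (k : Int) + 1) ((x :: xs).getD k 0) ((x :: xs).getD (k + 1) 0) := by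
    intro st k
    have h1 : (1 : Int) + (k : Int) - 1 = ((k : Nat) : Int) := by omega
    have h2 : (1 : Int) + (k : Int) = (((k + 1 : Nat)) : Int) := by push_cast; omega
    have h3 : (0 : Int) + (k : Int) + 1 = (((k + 1 : Nat)) : Int) := by push_cast; omega
    show pvGcore st (1 + (k : Int)) (PySem.List.pyGetD (x :: xs) (1 + (k : Int) - 1) 0)
          (PySem.List.pyGetD (x :: xs) (1 + (k : Int)) 0)
        = pvGcore st ((0 : Int) + (k : Int) + 1) ((x :: xs).getD k 0) ((x :: xs).getD (k + 1) 0)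
    rw [h1, h2, h3, PySem.List.pyGetD_natCast, PySem.List.pyGetD_natCast]
  rw [List.foldl_map]
  simp only [hbody]
  have := pv_range_getD_zip_idx pvGcore xs x [0] 0
  simpa using this

theorem pvG_snd (ps : List (Int × Int)) : ∀ (q : List Int × Int), (ps.foldl pvG q).2 = q.2 + ps.length := by
  induction ps with
  | nil => intro q; simp
  | cons p ps ih =>
    intro q
    rw [List.foldl_cons, ih]
    show q.2 + 1 + (ps.length : Int) = q.2 + ((ps.length + 1 : Nat) : Int)
    push_cast; omega

theorem pvG_fst_ne_nil (ps : List (Int × Int)) :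
    ∀ (q : List Int × Int), q.1 ≠ [] → (ps.foldl pvG q).1 ≠ [] := by
  induction ps with
  | nil => intro q h; simpa using h
  | cons p ps ih =>
    intro q h
    rw [List.foldl_cons]
    refine ih _ ?_
    show pvGcore q.1 q.2 p.1 p.2 ≠ []
    unfold pvGcore
    split <;> split <;> simp_all

-- boundary pairs (start, end) and the segments they denote
def pvPairsOf (S : List Int) (i : Int) : List (Int × Int) := S.zip (S.tail ++ [i])
def pvSliceF (arr : List Int) (p : Int × Int) : List Int := PySem.List.slice arr (some p.1) (some p.2)
def pvSegsOf (arr S : List Int) (i : Int) : List (List Int) :=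
  ((pvPairsOf S i).map (pvSliceF arr)).reverse

theorem pvPairsOf_append (S0 : List Int) (s i : Int) :
    pvPairsOf (S0 ++ [s]) i = pvPairsOf S0 s ++ [(s, i)] := by
  cases S0 with
  | nil => rfl
  | cons x S0' =>
    show ((x :: S0') ++ [s]).zip ((S0' ++ [s]) ++ [i]) = (x :: S0').zip (S0' ++ [s]) ++ [(s, i)]
    rw [List.zip_append (by simp)]
    rfl

theorem pvSegsOf_append (arr S0 : List Int) (s i : Int) :
    pvSegsOf arr (S0 ++ [s]) i = pvSliceF arr (s, i) :: pvSegsOf arr S0 s := by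
  simp [pvSegsOf, pvPairsOf_append]

theorem pvSlice_len (arr : List Int) (s j : Nat) (_hsj : s ≤ j) (hj : j ≤ arr.length) :
    (pvSliceF arr ((s : Int), (j : Int))).length = j - s := by
  simp [pvSliceF, PySem.List.slice_natCast]
  omega

theorem pvSlice_snoc (arr : List Int) (s j : Nat) (c : Int) (v' : List Int)
    (hsj : s ≤ j) (hd : arr.drop j = c :: v') :
    pvSliceF arr ((s : Int), (j : Int) + 1) = pvSliceF arr ((s : Int), (j : Int)) ++ [c] := by
  have hc : arr[j]? = some c := by
    have h0 : (arr.drop j)[0]? = some c := by rw [hd]; rfl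
    have h1 : (arr.drop j)[0]? = arr[j + 0]? := List.getElem?_drop
    rw [h1] at h0
    simpa using h0
  have h1 : ((j : Int) + 1) = (((j + 1 : Nat)) : Int) := by push_cast; ring
  rw [h1]
  simp only [pvSliceF, PySem.List.slice_natCast]
  have h2 : j + 1 - s = (j - s) + 1 := by omega
  rw [h2, List.take_add_one]
  congr 1
  have h3 : (arr.drop s)[j - s]? = arr[s + (j - s)]? := List.getElem?_drop
  rw [h3, show s + (j - s) = j by omega, hc]
  rfl

theorem pvSlice_single (arr : List Int) (j : Nat) (c : Int) (v' : List Int)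
    (hd : arr.drop j = c :: v') :
    pvSliceF arr ((j : Int), (j : Int) + 1) = [c] := by
  have h1 : ((j : Int) + 1) = (((j + 1 : Nat)) : Int) := by push_cast; ring
  rw [h1]
  simp only [pvSliceF, PySem.List.slice_natCast]
  rw [hd, show j + 1 - j = 1 by omega]
  rfl

-- simultaneous induction: the segments fold and the boundary fold stay in lock-step
theorem pv_seg_starts (arr : List Int) :
    ∀ (v : List Int) (x : Int) (j : Nat) (S0 : List Int) (s : Nat),
      arr.drop j = v → s < j →
      ((x :: v).zip v).foldl pvStepB (pvSegsOf arr (S0 ++ [(s : Int)]) (j : Int))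
        = (fun F => pvSegsOf arr F.1 F.2) (((x :: v).zip v).foldl pvG (S0 ++ [(s : Int)], (j : Int))) := by
  intro v
  induction v with
  | nil => intro x j S0 s _ _; simp
  | cons c v' ih =>
    intro x j S0 s hd hsj
    have hjlen : j < arr.length := by
      by_contra h
      rw [List.drop_eq_nil_of_le (by omega)] at hd
      exact (List.cons_ne_nil c v') hd.symm
    have hd' : arr.drop (j + 1) = v' := by
      have h1 := congrArg (List.drop 1) hd
      simp only [List.drop_drop] at h1
      simpa [Nat.add_comm] using h1
    simp only [List.zip_cons_cons, List.foldl_cons]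
    have hrunlen : (pvSliceF arr ((s : Int), (j : Int))).length = j - s :=
      pvSlice_len arr s j (by omega) (by omega)
    have hlast : PySem.List.pyGetD (S0 ++ [(s : Int)]) (-1) 0 = (s : Int) :=
      PySem.List.pyGetD_neg_one_append_singleton S0 ((s : Int)) 0
    have hcond : ((pvSliceF arr ((s : Int), (j : Int))).length < 5) ↔ ((j : Int) - (s : Int) < 5) := by
      rw [hrunlen]; omega
    have hcast : ((j : Int) + 1) = (((j + 1 : Nat)) : Int) := by push_cast; ring
    by_cases h5 : (j : Int) - (s : Int) < 5
    · by_cases hg : c - x = 1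
      · have hB : pvStepB (pvSegsOf arr (S0 ++ [(s : Int)]) (j : Int)) (x, c)
            = pvSegsOf arr (S0 ++ [(s : Int)]) ((j : Int) + 1) := by
          rw [pvSegsOf_append, pvSegsOf_append]
          simp only [pvStepB]
          rw [if_pos (by simp [hcond.mpr h5, hg])]
          rw [← pvSlice_snoc arr s j c v' (by omega) hd]
        have hG : pvG (S0 ++ [(s : Int)], (j : Int)) (x, c) = (S0 ++ [(s : Int)], (j : Int) + 1) := by
          simp only [pvG, pvGcore, hlast]
          rw [if_pos (by simp [h5, hg])]
        rw [hB, hG, hcast]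
        exact ih c (j + 1) S0 s hd' (by omega)
      · have hg3 : ¬ ((j : Int) - (s : Int) < 5 → False) := by simp [h5]
        have hB : pvStepB (pvSegsOf arr (S0 ++ [(s : Int)]) (j : Int)) (x, c)
            = pvSegsOf arr ((S0 ++ [(s : Int)]) ++ [(j : Int)]) ((j : Int) + 1) := by
          rw [pvSegsOf_append, pvSegsOf_append (S0 := S0 ++ [(s : Int)])]
          simp only [pvStepB]
          rw [if_neg (by simp [hcond.mpr h5, hg])]
          rw [pvSlice_single arr j c v' hd, pvSegsOf_append]
        have hG : pvG (S0 ++ [(s : Int)], (j : Int)) (x, c)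
            = ((S0 ++ [(s : Int)]) ++ [(j : Int)], (j : Int) + 1) := by
          simp only [pvG, pvGcore, hlast]
          rw [if_neg (by simp [h5, hg])]
        rw [hB, hG, hcast]
        have := ih c (j + 1) (S0 ++ [(s : Int)]) j hd' (by omega)
        simpa using this
    · by_cases hg : c - x ≤ 3
      · have hB : pvStepB (pvSegsOf arr (S0 ++ [(s : Int)]) (j : Int)) (x, c)
            = pvSegsOf arr (S0 ++ [(s : Int)]) ((j : Int) + 1) := by
          rw [pvSegsOf_append, pvSegsOf_append]
          simp only [pvStepB]
          rw [if_pos (by simp [hcond, h5, hg])]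
          rw [← pvSlice_snoc arr s j c v' (by omega) hd]
        have hG : pvG (S0 ++ [(s : Int)], (j : Int)) (x, c) = (S0 ++ [(s : Int)], (j : Int) + 1) := by
          simp only [pvG, pvGcore, hlast]
          rw [if_pos (by simp [h5, hg])]
        rw [hB, hG, hcast]
        exact ih c (j + 1) S0 s hd' (by omega)
      · have hB : pvStepB (pvSegsOf arr (S0 ++ [(s : Int)]) (j : Int)) (x, c)
            = pvSegsOf arr ((S0 ++ [(s : Int)]) ++ [(j : Int)]) ((j : Int) + 1) := by
          rw [pvSegsOf_append, pvSegsOf_append (S0 := S0 ++ [(s : Int)])]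
          simp only [pvStepB]
          rw [if_neg (by simp [hcond, h5, hg])]
          rw [pvSlice_single arr j c v' hd, pvSegsOf_append]
        have hG : pvG (S0 ++ [(s : Int)], (j : Int)) (x, c)
            = ((S0 ++ [(s : Int)]) ++ [(j : Int)], (j : Int) + 1) := by
          simp only [pvG, pvGcore, hlast]
          rw [if_neg (by simp [h5, hg])]
        rw [hB, hG, hcast]
        have := ih c (j + 1) (S0 ++ [(s : Int)]) j hd' (by omega)
        simpa using this

-- every boundary pair the fold produces is within bounds
def pvGood (N : Int) (p : Int × Int) : Prop := 0 ≤ p.1 ∧ p.1 ≤ p.2 ∧ p.2 ≤ N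

theorem pv_chain (N : Int) :
    ∀ (ps : List (Int × Int)) (S0 : List Int) (s i : Int),
      0 ≤ s → s < i → i + ps.length ≤ N →
      (∀ p ∈ pvPairsOf S0 s, pvGood N p) →
      ∀ p ∈ pvPairsOf ((ps.foldl pvG (S0 ++ [s], i)).1) N, pvGood N p := by
  intro ps
  induction ps with
  | nil =>
    intro S0 s i hs hsi hiN hgood p hp
    simp only [List.foldl_nil] at hp
    rw [pvPairsOf_append] at hp
    rcases List.mem_append.mp hp with h | h
    · exact hgood p h
    · simp at h
      subst h
      refine ⟨hs, by simp; omega, by simp⟩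
  | cons q ps ih =>
    intro S0 s i hs hsi hiN hgood
    simp only [List.length_cons] at hiN
    simp only [List.foldl_cons, pvG]
    by_cases hc : (if i - PySem.List.pyGetD (S0 ++ [s]) (-1) 0 < 5 then q.2 - q.1 = 1 else q.2 - q.1 ≤ 3)
    · rw [show pvGcore (S0 ++ [s]) i q.1 q.2 = S0 ++ [s] by unfold pvGcore; rw [if_pos hc]]
      exact ih S0 s (i + 1) hs (by omega) (by push_cast at hiN ⊢; omega) hgood
    · rw [show pvGcore (S0 ++ [s]) i q.1 q.2 = (S0 ++ [s]) ++ [i] by unfold pvGcore; rw [if_neg hc]]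
      refine ih (S0 ++ [s]) i (i + 1) (by omega) (by omega) (by push_cast at hiN ⊢; omega) ?_
      intro p hp
      rw [pvPairsOf_append] at hp
      rcases List.mem_append.mp hp with h | h
      · exact hgood p h
      · simp at h
        subst h
        refine ⟨hs, ?_, ?_⟩ <;> simp <;> push_cast at hiN ⊢ <;> omega

theorem pvSlice_len_int (arr : List Int) (p : Int × Int) (h : pvGood (arr.length : Int) p) :
    (((pvSliceF arr p).length : Int)) = p.2 - p.1 := by
  obtain ⟨h1, h2, h3⟩ := h
  unfold pvSliceF
  rw [PySem.List.slice_toNat (ha := h1) (hb := by omega)]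
  simp only [List.length_take, List.length_drop]
  omega

-- first-max over boundary pairs keyed by width, as a running fold
def pvPairBest (b p : Int × Int) : Int × Int := if b.2 - b.1 < p.2 - p.1 then p else b

theorem pv_max?_pair_cons (t : List (Int × Int)) :
    ∀ b : Int × Int,
      PySem.List.max? (b :: t) (fun p : Int × Int => p.2 - p.1) = some (t.foldl pvPairBest b) := by
  induction t with
  | nil => intro b; rfl
  | cons s t ih =>
    intro b
    have h1 : PySem.List.max? (b :: s :: t) (fun p : Int × Int => p.2 - p.1)
        = PySem.List.max? (pvPairBest b s :: t) (fun p : Int × Int => p.2 - p.1) := by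
      simp only [PySem.List.max?, List.foldl_cons]
      by_cases h : b.2 - b.1 < s.2 - s.1
      · simp [h, pvPairBest]
      · simp [h, pvPairBest]
    rw [h1, ih]
    simp [List.foldl_cons]

-- the running best commutes with taking slices, given all pairs are in bounds
theorem pv_fold_best_map (arr : List Int) :
    ∀ (t : List (Int × Int)) (b : Int × Int),
      pvGood (arr.length : Int) b → (∀ p ∈ t, pvGood (arr.length : Int) p) →
      (t.map (pvSliceF arr)).foldl pvBest (pvSliceF arr b) = pvSliceF arr (t.foldl pvPairBest b) := by
  intro t
  induction t with
  | nil => intro b _ _; rfl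
  | cons p t ih =>
    intro b hb ht
    have hp : pvGood (arr.length : Int) p := ht p (by simp)
    have hlb := pvSlice_len_int arr b hb
    have hlp := pvSlice_len_int arr p hp
    simp only [List.map_cons, List.foldl_cons]
    have hstep : pvBest (pvSliceF arr b) (pvSliceF arr p) = pvSliceF arr (pvPairBest b p) := by
      unfold pvBest pvPairBest
      by_cases h : b.2 - b.1 < p.2 - p.1
      · rw [if_pos h, if_pos (by omega)]
      · rw [if_neg h, if_neg (by omega)]
    rw [hstep]
    have hbest : pvGood (arr.length : Int) (pvPairBest b p) := by
      unfold pvPairBest; split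
      · exact hp
      · exact hb
    exact ih (pvPairBest b p) hbest (fun q hq => ht q (by simp [hq]))

-- ===== VERDICT (by name: the statement is the Claim_ definition above) =====
theorem get_longest_consecutive_ids_spec : Claim_equal_get_longest_consecutive_ids := by
  intro arr _ hpre
  unfold Spec_get_longest_consecutive_ids
  match arr, hpre with
  | a0 :: rest, _ =>
    -- abbreviations
    set arr := a0 :: rest with harr
    have hA : get_longest_consecutive_ids arr
        = (PySem.List.max? ((((arr).zip rest).foldl pvStepB [[a0]]).reverse) (fun s => s.length)).getD [] := by
      show (let st := (PySem.List.pyRange 1 ((arr).length : Int) 1).foldl (pvStepA arr) ([], [a0]);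
            if st.2.length > st.1.length then st.2 else st.1) = _
      rw [harr]
      simp only
      rw [pv_fold_idx_zip a0 rest ([], [a0])]
      have := pv_loop_inv ((a0 :: rest).zip rest) [a0] [] (by simp) (by simp)
      simpa using this
    -- the lock-step equality between collected segments and boundary pairs
    set F := ((arr.zip rest).foldl pvG ([0], 1)) with hF
    have hseg : (arr.zip rest).foldl pvStepB [[a0]] = pvSegsOf arr F.1 F.2 := by
      have hinit : pvSegsOf arr (([] : List Int) ++ [((0 : Nat) : Int)]) ((1 : Nat) : Int) = [[a0]] := by
        rw [pvSegsOf_append]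
        have hsl : pvSliceF arr (((0 : Nat) : Int), ((1 : Nat) : Int)) = [a0] := by
          show PySem.List.slice arr (some ((0 : Nat) : Int)) (some ((1 : Nat) : Int)) = [a0]
          rw [PySem.List.slice_natCast]
          rw [harr]; rfl
        rw [hsl]
        simp [pvSegsOf, pvPairsOf]
      have := pv_seg_starts arr rest a0 1 [] 0 (by rw [harr]; rfl) (by omega)
      simp only [Nat.cast_zero, Nat.cast_one] at this hinit
      rw [← hinit]
      rw [harr] at this ⊢
      exact this
    have hF2 : F.2 = (arr.length : Int) := by
      rw [hF, pvG_snd]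
      have : (arr.zip rest).length = rest.length := by
        rw [harr]; simp
      rw [this, harr]; push_cast; simp; omega
    -- all boundary pairs are within bounds
    have hgood : ∀ p ∈ pvPairsOf F.1 (arr.length : Int), pvGood (arr.length : Int) p := by
      have := pv_chain (arr.length : Int) (arr.zip rest) [] 0 1 (by omega) (by omega)
        (by rw [harr]; simp; omega) (by intro p hp; simp [pvPairsOf] at hp)
      simpa [hF] using this
    -- the pairs list is nonempty
    have hne : pvPairsOf F.1 (arr.length : Int) ≠ [] := by
      have h1 : F.1 ≠ [] := pvG_fst_ne_nil (arr.zip rest) ([0], 1) (by simp)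
      intro h
      apply h1
      unfold pvPairsOf at h
      have := congrArg List.length h
      simp [List.length_zip] at this
      omega
    obtain ⟨b, t, hbt⟩ := List.exists_cons_of_ne_nil hne
    -- unfold B
    have hB : get_longest_consecutive_ids_alt arr
        = pvSliceF arr ((PySem.List.max? (pvPairsOf F.1 (arr.length : Int)) (fun p => p.2 - p.1)).getD (0, 0)) := by
      show pvSliceF arr ((PySem.List.max?
          (((PySem.List.pyRange 1 ((arr.length : Int)) 1).foldl (pvStepStarts arr) [0]).zip
            (PySem.List.slice ((PySem.List.pyRange 1 ((arr.length : Int)) 1).foldl (pvStepStarts arr) [0]) (some 1) none ++ [(arr.length : Int)]))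
          (fun p => p.2 - p.1)).getD (0, 0))
        = _
      rw [harr, pv_fold_starts a0 rest, PySem.List.slice_from_one]
      rfl
    -- chain the two max computations together
    rw [hA, hB, hseg, hF2]
    unfold pvSegsOf
    rw [List.reverse_reverse, hbt]
    have hgb : pvGood (arr.length : Int) b := hgood b (by rw [hbt]; simp)
    have hgt : ∀ p ∈ t, pvGood (arr.length : Int) p := fun p hp => hgood p (by rw [hbt]; simp [hp])
    rw [List.map_cons, pv_max?_cons, pv_max?_pair_cons, Option.getD_some, Option.getD_some]
    exact pv_fold_best_map arr t b hgb hgt
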